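-- pv_equiv track=rewrite | github.com/ECEtushar/DataStructrures_Algo | Recursion/delete_Middle_of_Stack.py | delK
-- ===== SOURCE A (Python) =====
-- def delK(st,k):
--     if k == 1:
--         st.pop()
--         return st
--     x = st.pop()
--     delK(st,k-1)
--     st.append(x)
--     return st
-- ===== SOURCE B (Python) =====
-- def delK(st, k):
--     # Delete the k-th element from the top of the stack directly by index
--     # (same in-place net mutation as the recursive version), return st.
--     st.pop(len(st) - k)
--     return st
-- ===== Notes on version B (the rewrite author's own statement) =====
-- stated objective: simpler
-- what changed: Replaces the recursion that pops k-1 elements, deletes, and re-appends them with a single direct index deletion st.pop(len(st)-k).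
import Mathlib
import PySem

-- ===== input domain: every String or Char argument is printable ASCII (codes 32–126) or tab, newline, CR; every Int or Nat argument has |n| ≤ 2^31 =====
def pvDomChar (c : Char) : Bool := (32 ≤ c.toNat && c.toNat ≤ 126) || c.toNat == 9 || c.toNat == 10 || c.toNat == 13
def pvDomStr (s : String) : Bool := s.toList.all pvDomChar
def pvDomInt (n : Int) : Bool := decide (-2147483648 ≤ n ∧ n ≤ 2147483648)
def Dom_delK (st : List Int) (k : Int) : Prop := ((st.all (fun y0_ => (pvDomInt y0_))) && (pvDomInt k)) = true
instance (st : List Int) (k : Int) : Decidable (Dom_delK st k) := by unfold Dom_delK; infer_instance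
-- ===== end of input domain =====

-- B replaces the pop/recurse/re-append recursion by one direct index deletion st.pop(len(st)-k);
-- both mutate st in place with the same net effect, and the equivalence proved is about the return value.

-- ===== PORT A =====
-- A pops the top (st.pop()), recurses with k-1, and pushes the popped element back.
def delK (st : List Int) (k : Int) : List Int :=
  if k = 1 then
    match PySem.List.pop? st with
    | some (_, rest) => rest
    | none => st          -- Python raises IndexError here; outside Pre_
  else
    match h : PySem.List.pop? st with
    | some (x, rest) => delK rest (k - 1) ++ [x]
    | none => st          -- Python raises IndexError here; outside Pre_
termination_by st.length
decreasing_by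
  have hl := PySem.List.length_of_pop?_eq_some st h
  simp only [] at hl
  omega

-- ===== PORT B =====
-- st.pop(len(st) - k); return st
def delK_alt (st : List Int) (k : Int) : List Int :=
  match PySem.List.pop? st ((st.length : Int) - k) with
  | some (_, rest) => rest
  | none => st            -- Python raises IndexError here; outside Pre_

-- ===== PRECONDITION & SPEC =====
-- Pre_ excludes exactly the inputs on which A raises IndexError (k < 1 or k > len(st)).
def Pre_delK (st : List Int) (k : Int) : Prop := 1 ≤ k ∧ k ≤ (st.length : Int)
instance (st : List Int) (k : Int) : Decidable (Pre_delK st k) := by unfold Pre_delK; infer_instance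

def pvWitness_delK : List Int × Int := ([1, 2, 3], 2)

def Spec_delK (st : List Int) (k : Int) (out : List Int) : Prop := out = delK_alt st k
instance (st : List Int) (k : Int) (out : List Int) : Decidable (Spec_delK st k out) := by unfold Spec_delK; infer_instance

-- ===== CLAIM (what is proved, stated in full; the proofs are below) =====
def Claim_equal_delK : Prop := ∀ (st : List Int) (k : Int), Dom_delK st k → Pre_delK st k → Spec_delK st k (delK st k)

-- ===== LEMMAS AND PROOFS =====

-- A's recursion computes eraseIdx at position len - k.
lemma delK_eq_eraseIdx : ∀ (st : List Int) (k : Int), 1 ≤ k → k ≤ (st.length : Int) →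
    delK st k = st.eraseIdx (st.length - k.toNat) := by
  intro st
  induction st using List.reverseRecOn with
  | nil => intro k h1 h2; simp at h2; omega
  | append_singleton xs x ih =>
    intro k h1 h2
    rw [delK.eq_def]
    by_cases hk : k = 1
    · subst hk
      simp [PySem.List.pop?_last, List.eraseIdx_append_of_length_le (le_refl xs.length)]
    · simp only [if_neg hk]
      have hlen : (k - 1) ≤ (xs.length : Int) := by simp at h2; omega
      split
      case h_2 h => rw [PySem.List.pop?_last] at h; exact absurd h (by simp)
      case h_1 x' rest h =>
      rw [PySem.List.pop?_last] at h
      obtain ⟨h3, h4⟩ := Prod.mk.injEq .. ▸ Option.some.inj h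
      subst h3; subst h4
      rw [ih (k - 1) (by omega) hlen]
      have hlt : xs.length - (k - 1).toNat < xs.length := by omega
      have hidx : (xs ++ [x]).length - k.toNat = xs.length - (k - 1).toNat := by
        simp only [List.length_append, List.length_singleton]; omega
      rw [hidx, List.eraseIdx_append_of_lt_length hlt]

-- B's index deletion computes the same eraseIdx.
lemma delK_alt_eq_eraseIdx : ∀ (st : List Int) (k : Int), 1 ≤ k → k ≤ (st.length : Int) →
    delK_alt st k = st.eraseIdx (st.length - k.toNat) := by
  intro st k h1 h2
  unfold delK_alt
  have hm : st.length - k.toNat < st.length := by omega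
  have hidx : (st.length : Int) - k = ((st.length - k.toNat : Nat) : Int) := by omega
  rw [hidx, PySem.List.pop?_natCast st _ hm]

-- ===== VERDICT (by name: the statement is the Claim_ definition above) =====
theorem delK_spec : Claim_equal_delK := by
  intro st k _ hpre
  unfold Spec_delK
  rw [delK_eq_eraseIdx st k hpre.1 hpre.2, delK_alt_eq_eraseIdx st k hpre.1 hpre.2]
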